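-- pv_equiv track=rewrite | github.com/kj-art/developer-portfolio | batch_rename/examples/05_custom_functions/intelligent_template.py | _format_client
-- ===== SOURCE A (Python) =====
-- def _format_client(data):
--     """Format client name for directory structure."""
--     client = data.get('client', 'Unknown')
--
--     # Clean and standardize client names
--     client_clean = client.upper().replace('_', '-').replace(' ', '-')
--
--     # Handle common corporate suffixes
--     suffixes = {
--         'CORPORATION': 'CORP',
--         'INCORPORATED': 'INC',
--         'LIMITED': 'LTD',
--         'COMPANY': 'CO'
--     }
--
--     for old_suffix, new_suffix in suffixes.items():
--         if client_clean.endswith(f'-{old_suffix}'):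
--             client_clean = client_clean[:-len(old_suffix)] + new_suffix
--             break
--
--     return client_clean
-- ===== SOURCE B (Python) =====
-- def _format_client(data):
--     """Format client name for directory structure."""
--     client = data.get('client', 'Unknown')
--     # Same cleaning step as before
--     client_clean = client.upper().replace('_', '-').replace(' ', '-')
--
--     suffixes = {
--         'CORPORATION': 'CORP',
--         'INCORPORATED': 'INC',
--         'LIMITED': 'LTD',
--         'COMPANY': 'CO'
--     }
--
--     # Split off the final dash-separated token and shorten it by one hash lookup
--     parts = client_clean.rsplit('-', 1)
--     if len(parts) == 2 and parts[1] in suffixes: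
--         client_clean = parts[0] + '-' + suffixes[parts[1]]
--     return client_clean
-- ===== Notes on version B (the rewrite author's own statement) =====
-- stated objective: idiomatic
-- what changed: Replaces A's for-loop that tests each of the four corporate suffixes with endswith by a single rsplit('-', 1) that extracts the final dash-separated token followed by one dict lookup on that token.
import Mathlib
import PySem

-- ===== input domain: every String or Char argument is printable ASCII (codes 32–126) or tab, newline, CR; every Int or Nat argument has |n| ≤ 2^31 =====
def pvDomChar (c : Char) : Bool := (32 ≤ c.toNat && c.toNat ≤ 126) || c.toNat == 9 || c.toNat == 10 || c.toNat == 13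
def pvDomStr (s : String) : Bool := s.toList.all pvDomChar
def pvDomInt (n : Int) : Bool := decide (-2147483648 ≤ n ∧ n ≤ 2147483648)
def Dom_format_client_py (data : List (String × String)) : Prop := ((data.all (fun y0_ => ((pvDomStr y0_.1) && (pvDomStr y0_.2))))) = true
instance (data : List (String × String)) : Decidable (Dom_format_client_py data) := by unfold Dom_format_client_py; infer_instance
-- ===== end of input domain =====

-- B replaces A's scan over the four candidate suffixes by one rsplit at the last dash plus a single
-- association lookup on the tail token (objective: idiomatic; same behaviour, no speed claim).


-- ===== PORT A =====
-- the cleaning step, identical in A and B: client.upper().replace('_', '-').replace(' ', '-')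
def pvClean (client : String) : List Char :=
  PySem.Chars.replace (PySem.Chars.replace (PySem.Chars.upper client.toList) ['_'] ['-']) [' '] ['-']

-- the literal 'suffixes' dict of A, in its iteration order
def pvSuffixesA : List (List Char × List Char) :=
  [("CORPORATION".toList, "CORP".toList), ("INCORPORATED".toList, "INC".toList),
   ("LIMITED".toList, "LTD".toList), ("COMPANY".toList, "CO".toList)]

-- A's for-loop with break: the first suffix test that fires rewrites client_clean and stops
def pvSuffixLoopA : List (List Char × List Char) → List Char → List Char
  | [], c => c
  | (oldS, newS) :: rest, c =>
      if PySem.Chars.endswith c ('-' :: oldS) then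
        PySem.Chars.slice c none (some (-(oldS.length : Int))) ++ newS
      else pvSuffixLoopA rest c

def format_client_py (data : List (String × String)) : String :=
  String.ofList (pvSuffixLoopA pvSuffixesA
    (pvClean ((PySem.Dict.ofList data).getD "client" "Unknown")))

-- ===== PORT B =====
-- B's 'suffixes' dict, used only for one lookup on the tail token
def pvSuffixesB : List (List Char × List Char) :=
  [("CORPORATION".toList, "CORP".toList), ("INCORPORATED".toList, "INC".toList),
   ("LIMITED".toList, "LTD".toList), ("COMPANY".toList, "CO".toList)]

-- client_clean.rsplit('-', 1), ported by hand (PySem has no rsplit): split at the LAST '-', exact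
def pvRsplit1 (cs : List Char) : List (List Char) :=
  match cs.reverse.span (· ≠ '-') with
  | (_, []) => [cs]
  | (tl, _ :: front) => [front.reverse, tl.reverse]

def format_client_py_alt (data : List (String × String)) : String :=
  let clientClean := pvClean ((PySem.Dict.ofList data).getD "client" "Unknown")
  match pvRsplit1 clientClean with
  | [p, t] =>
      match pvSuffixesB.lookup t with
      | some v => String.ofList (p ++ '-' :: v)
      | none => String.ofList clientClean
  | _ => String.ofList clientClean

-- ===== PRECONDITION & SPEC =====
def Spec_format_client_py (data : List (String × String)) (out : String) : Prop := out = format_client_py_alt data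
instance (data : List (String × String)) (out : String) : Decidable (Spec_format_client_py data out) := by unfold Spec_format_client_py; infer_instance

-- ===== CLAIM (what is proved, stated in full; the proofs are below) =====
def Claim_equal_format_client_py : Prop := ∀ (data : List (String × String)), Dom_format_client_py data → Spec_format_client_py data (format_client_py data)

-- ===== LEMMAS AND PROOFS =====

lemma pvEndswith_false_of_no_dash (cs o : List Char) (h : '-' ∉ cs) :
    PySem.Chars.endswith cs ('-' :: o) = false := by
  rw [← Bool.not_eq_true, PySem.Chars.endswith_iff]
  intro hsuf
  exact h (List.IsSuffix.mem (List.mem_cons_self ..) hsuf)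

lemma pvLoop_no_dash (sfx : List (List Char × List Char)) (cs : List Char) (h : '-' ∉ cs) :
    pvSuffixLoopA sfx cs = cs := by
  induction sfx with
  | nil => rfl
  | cons hd tl ih =>
    obtain ⟨o, v⟩ := hd
    simp [pvSuffixLoopA, pvEndswith_false_of_no_dash cs o h, ih]

lemma pvSuffix_cons_eq (x : Char) (a b : List Char) (hb : x ∉ b)
    (h : x :: a <:+ x :: b) : a = b := by
  obtain ⟨p, hp⟩ := h
  cases p with
  | nil => simpa using hp
  | cons y p' =>
    exfalso
    have hp' : y = x ∧ p' ++ x :: a = b := by simpa using hp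
    exact hb (hp'.2 ▸ (by simp : x ∈ p' ++ x :: a))

lemma pvEndswith_iff_eq (pre t o : List Char) (hdt : '-' ∉ t) (hdo : '-' ∉ o) :
    PySem.Chars.endswith (pre ++ '-' :: t) ('-' :: o) = true ↔ o = t := by
  rw [PySem.Chars.endswith_iff]
  constructor
  · intro hsuf
    have h2 : '-' :: t <:+ pre ++ '-' :: t := ⟨pre, rfl⟩
    rcases List.suffix_or_suffix_of_suffix hsuf h2 with h | h
    · exact pvSuffix_cons_eq '-' o t hdt h
    · exact (pvSuffix_cons_eq '-' t o hdo h).symm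
  · rintro rfl; exact ⟨pre, rfl⟩

lemma pvSlice_drop (q o : List Char) (h : 0 < o.length) :
    PySem.Chars.slice (q ++ o) none (some (-(o.length : Int))) = q := by
  have hc : PySem.List.clampIdx (q.length + o.length) (-(o.length : Int)) = q.length := by
    unfold PySem.List.clampIdx; split_ifs <;> omega
  simp [PySem.List.slice, hc]

lemma pvLoop_eq_lookup (sfx : List (List Char × List Char)) (pre t : List Char)
    (hdt : '-' ∉ t) (hk : ∀ p ∈ sfx, '-' ∉ p.1 ∧ p.1 ≠ []) :
    pvSuffixLoopA sfx (pre ++ '-' :: t) =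
      (match sfx.lookup t with
       | some v => pre ++ '-' :: v
       | none => pre ++ '-' :: t) := by
  induction sfx with
  | nil => simp [pvSuffixLoopA]
  | cons hd tl ih =>
    obtain ⟨o, v⟩ := hd
    have ho := hk (o, v) (by simp)
    by_cases he : o = t
    · subst he
      have hEnds : PySem.Chars.endswith (pre ++ '-' :: o) ('-' :: o) = true :=
        (pvEndswith_iff_eq pre o o ho.1 ho.1).mpr rfl
      have hre : pre ++ '-' :: o = (pre ++ ['-']) ++ o := by simp
      have hlen : 0 < o.length := List.length_pos_iff.mpr ho.2
      simp only [pvSuffixLoopA, hEnds, if_true, List.lookup, BEq.rfl]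
      rw [hre, pvSlice_drop (pre ++ ['-']) o hlen]
      simp
    · have hEnds : PySem.Chars.endswith (pre ++ '-' :: t) ('-' :: o) = false := by
        rw [← Bool.not_eq_true, pvEndswith_iff_eq pre t o hdt ho.1]
        exact he
      have hb : (t == o) = false := beq_eq_false_iff_ne.mpr (Ne.symm he)
      simp only [pvSuffixLoopA, hEnds, Bool.false_eq_true, if_false, List.lookup, hb]
      exact ih (fun p hp => hk p (List.mem_cons_of_mem _ hp))

lemma pvMain (cs : List Char) :
    String.ofList (pvSuffixLoopA pvSuffixesA cs) =
      (match pvRsplit1 cs with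
       | [p, t] =>
           match pvSuffixesB.lookup t with
           | some v => String.ofList (p ++ '-' :: v)
           | none => String.ofList cs
       | _ => String.ofList cs) := by
  unfold pvRsplit1
  rw [List.span_eq_takeWhile_dropWhile]
  rcases hdrop : cs.reverse.dropWhile (· ≠ '-') with _ | ⟨x, front⟩
  · have hnd : '-' ∉ cs := by
      intro hm
      have hall := List.dropWhile_eq_nil_iff.mp hdrop '-' (List.mem_reverse.mpr hm)
      simp at hall
    show String.ofList (pvSuffixLoopA pvSuffixesA cs) = String.ofList cs
    rw [pvLoop_no_dash _ _ hnd]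
  · have hx : x = '-' := by
      have hne : List.dropWhile (fun x => decide (x ≠ '-')) cs.reverse ≠ [] := by
        rw [hdrop]; simp
      have hhead := List.head_dropWhile_not (fun x => decide (x ≠ '-')) hne
      simp only [hdrop, List.head_cons] at hhead
      simpa using hhead
    subst hx
    have hsplit := List.takeWhile_append_dropWhile (p := fun c => c ≠ '-') (l := cs.reverse)
    rw [hdrop] at hsplit
    have hcs : cs = front.reverse ++ '-' :: (cs.reverse.takeWhile (fun c => c ≠ '-')).reverse := by
      conv_lhs => rw [← List.reverse_reverse cs, ← hsplit]
      simp
    have hdt : '-' ∉ (cs.reverse.takeWhile (fun c => c ≠ '-')).reverse := by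
      intro hm
      have := List.mem_takeWhile_imp (List.mem_reverse.mp hm)
      simp at this
    show String.ofList (pvSuffixLoopA pvSuffixesA cs) =
      (match List.lookup (cs.reverse.takeWhile (fun c => c ≠ '-')).reverse pvSuffixesB with
       | some v => String.ofList (front.reverse ++ '-' :: v)
       | none => String.ofList cs)
    conv_lhs => rw [hcs]
    rw [pvLoop_eq_lookup pvSuffixesA front.reverse _ hdt (by decide)]
    have hAB : pvSuffixesA = pvSuffixesB := rfl
    rw [hAB]
    cases hE : List.lookup (cs.reverse.takeWhile (fun c => c ≠ '-')).reverse pvSuffixesB with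
    | none => rw [← hcs]
    | some v => rfl

-- ===== VERDICT (by name: the statement is the Claim_ definition above) =====
theorem format_client_py_spec : Claim_equal_format_client_py := by
  intro data _
  unfold Spec_format_client_py format_client_py format_client_py_alt
  exact pvMain (pvClean ((PySem.Dict.ofList data).getD "client" "Unknown"))
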